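-- pv_equiv track=rewrite | github.com/MoraV22/AI-porjects | question_1.py | get_is_a
-- ===== SOURCE A (Python) =====
-- semantic_network: dict[str, dict[str, list[str]]] = {
--     "James":{
--         "is_a": ["Person"],
--         "likes": ["Mona Lisa"],
--         "is_in": [],
--         "painted": []
--     },
--     "Mona Lisa":{
--         "is_a": [],
--         "likes": [],
--         "is_in": ["Louvre"],
--         "painted": []},
--     "Louvre":{
--         "is_a": ["Museum"],
--         "likes": [],
--         "is_in": ["Paris"],
--         "painted": []},
--         "Da Vinci":{
--         "is_a": ["Person"],
--         "likes": [],
--         "is_in": [],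
--         "painted": ["Mona Lisa"]
--         }
--     }
--
-- def get_is_a(concept : str) -> set[str]:
--     visited : set[str] = set()
--     is_a : set[str] = set()
--
--     def traverse(node : str):
--         if node in visited:
--             return
--         visited.add(node)
--         data = semantic_network.get(node, {})
--         is_a.update(data.get("is_a", []))
--         for parent in data.get("is_a", []):
--             traverse(parent)
--
--     traverse(concept)
--     return is_a
-- ===== SOURCE B (Python) =====
-- semantic_network: dict[str, dict[str, list[str]]] = {
--     "James":{
--         "is_a": ["Person"],
--         "likes": ["Mona Lisa"],
--         "is_in": [],
--         "painted": []
--     },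
--     "Mona Lisa":{
--         "is_a": [],
--         "likes": [],
--         "is_in": ["Louvre"],
--         "painted": []},
--     "Louvre":{
--         "is_a": ["Museum"],
--         "likes": [],
--         "is_in": ["Paris"],
--         "painted": []},
--         "Da Vinci":{
--         "is_a": ["Person"],
--         "likes": [],
--         "is_in": [],
--         "painted": ["Mona Lisa"]
--         }
--     }
--
-- def get_is_a(concept: str) -> set[str]:
--     visited: set[str] = set()
--     is_a: set[str] = set()
--     stack = [concept]
--     while stack:
--         node = stack.pop()
--         if node in visited:
--             continue
--         visited.add(node)
--         parents = semantic_network.get(node, {}).get("is_a", [])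
--         is_a.update(parents)
--         stack.extend(parents)
--     return is_a
-- ===== Notes on version B (the rewrite author's own statement) =====
-- stated objective: alternative
-- what changed: Replaced the recursive DFS with nested closures by an iterative explicit-stack traversal (pop, skip visited, accumulate parents, push parents).
import Mathlib
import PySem

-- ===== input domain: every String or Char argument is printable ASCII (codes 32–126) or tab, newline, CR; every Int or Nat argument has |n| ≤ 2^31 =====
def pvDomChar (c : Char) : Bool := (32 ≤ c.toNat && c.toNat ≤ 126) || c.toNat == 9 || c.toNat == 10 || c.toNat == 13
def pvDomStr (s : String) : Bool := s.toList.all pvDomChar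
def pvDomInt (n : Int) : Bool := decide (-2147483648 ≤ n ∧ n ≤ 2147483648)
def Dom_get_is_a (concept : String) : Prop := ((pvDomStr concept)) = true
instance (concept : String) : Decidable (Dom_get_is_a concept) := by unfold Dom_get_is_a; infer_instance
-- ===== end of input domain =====

-- B replaces A's recursive DFS by an iterative explicit-stack traversal; same reachable-ancestor set.
-- ===== PORT A =====
def semNet : PySem.Dict String (PySem.Dict String (List String)) :=
  PySem.Dict.mk [
    ("James", PySem.Dict.mk [("is_a", ["Person"]), ("likes", ["Mona Lisa"]), ("is_in", []), ("painted", [])]),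
    ("Mona Lisa", PySem.Dict.mk [("is_a", []), ("likes", []), ("is_in", ["Louvre"]), ("painted", [])]),
    ("Louvre", PySem.Dict.mk [("is_a", ["Museum"]), ("likes", []), ("is_in", ["Paris"]), ("painted", [])]),
    ("Da Vinci", PySem.Dict.mk [("is_a", ["Person"]), ("likes", []), ("is_in", []), ("painted", ["Mona Lisa"])])]

-- A's 'traverse': fuel makes the nested recursion total; fuel 8 exceeds any is_a chain in the
-- fixed 4-entry network, so it is never exhausted.
def traverseA : Nat → String → PySem.Set String × PySem.Set String → PySem.Set String × PySem.Set String
  | 0, _, st => st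
  | fuel+1, node, (visited, isa) =>
    if PySem.Set.contains visited node then (visited, isa)
    else
      let visited := PySem.Set.add visited node
      let data := PySem.Dict.getD semNet node PySem.Dict.empty
      let parents := PySem.Dict.getD data "is_a" []
      let isa := PySem.Set.update isa parents
      parents.foldl (fun st p => traverseA fuel p st) (visited, isa)

def get_is_a (concept : String) : List String :=
  (traverseA 8 concept (PySem.Set.empty, PySem.Set.empty)).2

-- ===== PORT B =====
-- iterative loop; fuel bounds the while-loop iterations (at most 1 + total parents pushed,
-- far below 16 on the fixed network), so it is never exhausted.
def loopB : Nat → List String → PySem.Set String → PySem.Set String → PySem.Set String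
  | 0, _, _, isa => isa
  | fuel+1, stack, visited, isa =>
    match stack.getLast? with
    | none => isa
    | some node =>
      let stack := stack.dropLast
      if PySem.Set.contains visited node then loopB fuel stack visited isa
      else
        let visited := PySem.Set.add visited node
        let parents := PySem.Dict.getD (PySem.Dict.getD semNet node PySem.Dict.empty) "is_a" []
        loopB fuel (stack ++ parents) visited (PySem.Set.update isa parents)

def get_is_a_alt (concept : String) : List String :=
  loopB 16 [concept] PySem.Set.empty PySem.Set.empty

-- ===== PRECONDITION & SPEC =====
def Spec_get_is_a (concept : String) (out : List String) : Prop := out = get_is_a_alt concept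
instance (concept : String) (out : List String) : Decidable (Spec_get_is_a concept out) := by unfold Spec_get_is_a; infer_instance

-- ===== CLAIM (what is proved, stated in full; the proofs are below) =====
def Claim_equal_get_is_a : Prop := ∀ (concept : String), Dom_get_is_a concept → Spec_get_is_a concept (get_is_a concept)

-- ===== LEMMAS AND PROOFS =====

-- ===== VERDICT (by name: the statement is the Claim_ definition above) =====
theorem get_is_a_spec : Claim_equal_get_is_a := by
  intro concept _
  unfold Spec_get_is_a
  by_cases h1 : concept = "James"; · subst h1; rfl
  by_cases h2 : concept = "Mona Lisa"; · subst h2; rfl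
  by_cases h3 : concept = "Louvre"; · subst h3; rfl
  by_cases h4 : concept = "Da Vinci"; · subst h4; rfl
  have hc : PySem.Dict.contains semNet concept = false := by
    simp [semNet, Ne.symm h1, Ne.symm h2, Ne.symm h3, Ne.symm h4]
  have hd : PySem.Dict.getD semNet concept PySem.Dict.empty = PySem.Dict.empty :=
    PySem.Dict.getD_of_not_contains semNet PySem.Dict.empty hc
  simp [get_is_a, get_is_a_alt, traverseA, loopB, hd,
    PySem.Set.contains, PySem.Set.add, PySem.Set.update, PySem.Set.empty,
    PySem.Dict.getD_empty]
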